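-- pv_equiv track=rewrite | github.com/ericweigle/advent-of-code | 2023/11/day11-1.py | effective_col
-- ===== SOURCE A (Python) =====
-- def effective_col(data, expansion_rate):
--   result = dict()
--   for col in range(len(data[0])):
--     transpose = [line[col] for line in data]
--     if len(set(transpose)) ==1 and transpose[0]=='.':
--       result[col] = result.get(col-1,0) + expansion_rate
--     else:
--       result[col] = result.get(col-1,0) + 1
--   return result
-- ===== SOURCE B (Python) =====
-- def effective_col(data, expansion_rate):
--     width = len(data[0])
--     dots = None
--     for line in data:
--         line_dots = {i for i, ch in enumerate(line) if ch == '.'}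
--         dots = line_dots if dots is None else dots & line_dots
--     return {col: col + 1 + (expansion_rate - 1) * sum(1 for e in dots if e <= col)
--             for col in range(width)}
-- ===== Notes on version B (the rewrite author's own statement) =====
-- stated objective: alternative
-- what changed: A scans each column over all rows building a per-column set and chains values through the dict self-lookup result.get(col-1,0); B never scans columns: it intersects, row-major, each line's set of dot positions to get the empty columns, then fills the dict by the closed form col+1+(expansion_rate-1)*|{e in dots : e <= col}| with no lookback and no per-column row scan.
import Mathlib
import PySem

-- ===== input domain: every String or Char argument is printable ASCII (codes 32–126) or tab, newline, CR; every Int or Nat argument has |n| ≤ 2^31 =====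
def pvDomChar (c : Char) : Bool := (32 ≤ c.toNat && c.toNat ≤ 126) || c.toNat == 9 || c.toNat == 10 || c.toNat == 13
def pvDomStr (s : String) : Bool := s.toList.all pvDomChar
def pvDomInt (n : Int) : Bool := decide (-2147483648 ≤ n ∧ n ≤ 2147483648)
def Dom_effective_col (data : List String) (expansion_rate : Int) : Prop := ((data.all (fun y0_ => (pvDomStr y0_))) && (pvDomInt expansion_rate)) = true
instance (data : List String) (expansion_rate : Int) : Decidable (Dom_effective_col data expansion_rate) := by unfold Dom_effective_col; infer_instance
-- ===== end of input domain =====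

-- B replaces A's per-column row scans and dict-lookback recurrence by a row-major set
-- intersection of dot positions plus a closed-form value per column (objective: alternative).

-- ===== PORT A =====
def effective_col (data : List String) (expansion_rate : Int) : List (Int × Int) :=
  match data with
  | [] => []  -- Python: data[0] raises IndexError here; outside Pre_
  | first :: _ =>
    ((PySem.List.pyRange 0 (PySem.Str.len first) 1).foldl
      (fun (result : PySem.Dict Int Int) col =>
        -- transpose = [line[col] for line in data]; getD ' ' only reached outside Pre_
        let transpose := data.map (fun line => (PySem.Str.pyGet? line col).getD ' ')
        if ((PySem.Set.ofList transpose).length == 1) && (PySem.List.pyGetD transpose 0 ' ' == '.') then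
          result.insert col (result.getD (col - 1) 0 + expansion_rate)
        else
          result.insert col (result.getD (col - 1) 0 + 1))
      PySem.Dict.empty).items

-- ===== PORT B =====
-- {i for i, ch in enumerate(line) if ch == '.'}
def pvLineDots (line : String) : PySem.Set Int :=
  PySem.Set.ofList (((PySem.List.enumerate line.toList).filter (fun p => p.2 == '.')).map (·.1))

def effective_col_alt (data : List String) (expansion_rate : Int) : List (Int × Int) :=
  match data with
  | [] => []  -- Python: len(data[0]) raises IndexError here; outside Pre_
  | first :: rest =>
    -- dots = None; for line in data: ... (first iteration takes the line's set itself)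
    let dots := rest.foldl (fun s line => PySem.Set.inter s (pvLineDots line)) (pvLineDots first)
    -- dict comprehension over range(width); sum(1 for e in dots if e <= col) = length of the filter
    ((PySem.List.pyRange 0 (PySem.Str.len first) 1).foldl
      (fun (d : PySem.Dict Int Int) col =>
        d.insert col (col + 1 + (expansion_rate - 1) *
          (((dots.filter (fun e => decide (e ≤ col))).length : Int))))
      PySem.Dict.empty).items

-- ===== PRECONDITION & SPEC =====
-- Pre_ excludes exactly the inputs where Python A raises IndexError: empty data, or a line
-- shorter than the first line (line[col] out of range while building the transpose).
def Pre_effective_col (data : List String) (expansion_rate : Int) : Prop :=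
  data ≠ [] ∧ ∀ line ∈ data, PySem.Str.len (data.headD "") ≤ PySem.Str.len line
instance (data : List String) (expansion_rate : Int) : Decidable (Pre_effective_col data expansion_rate) := by unfold Pre_effective_col; infer_instance

def pvWitness_effective_col : List String × Int := ([".#.", "...", ".#."], 10)

def Spec_effective_col (data : List String) (expansion_rate : Int) (out : List (Int × Int)) : Prop := out = effective_col_alt data expansion_rate
instance (data : List String) (expansion_rate : Int) (out : List (Int × Int)) : Decidable (Spec_effective_col data expansion_rate out) := by unfold Spec_effective_col; infer_instance

-- ===== CLAIM (what is proved, stated in full; the proofs are below) =====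
def Claim_equal_effective_col : Prop := ∀ (data : List String) (expansion_rate : Int), Dom_effective_col data expansion_rate → Pre_effective_col data expansion_rate → Spec_effective_col data expansion_rate (effective_col data expansion_rate)

-- ===== LEMMAS AND PROOFS =====

-- all elements of a nonempty list equal c  ⟺  its set has size 1 and its head is c
lemma pv_foldl_add_const {α : Type} [BEq α] [LawfulBEq α] (c : α) (xs : List α)
    (h : ∀ y ∈ xs, y = c) : xs.foldl PySem.Set.add [c] = [c] := by
  induction xs with
  | nil => rfl
  | cons a l ih =>
    have ha : a = c := h a (by simp)
    subst ha
    have : PySem.Set.add [a] a = [a] := by simp [PySem.Set.add, PySem.Set.contains]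
    simpa [this] using ih (fun y hy => h y (by simp [hy]))

lemma pv_cond_eq {α : Type} [BEq α] [LawfulBEq α] (x : α) (xs : List α) (c : α) :
    ((((PySem.Set.ofList (x :: xs)).length == 1)) && (x == c)) = (x :: xs).all (· == c) := by
  by_cases hx : x = c
  · subst hx
    simp only [BEq.rfl, Bool.and_true, List.all_cons, Bool.true_and]
    by_cases hall : ∀ y ∈ xs, y = x
    · have h1 : PySem.Set.ofList (x :: xs) = [x] := by
        rw [PySem.Set.ofList_eq_foldl]
        simpa [PySem.Set.add] using pv_foldl_add_const x xs hall
      have h2 : xs.all (· == x) = true := by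
        simp only [List.all_eq_true, beq_iff_eq]; exact hall
      simp [h1, h2]
    · rw [not_forall] at hall
      simp only [not_forall, exists_prop] at hall
      obtain ⟨y, hy, hyx⟩ := hall
      have hxm : x ∈ PySem.Set.ofList (x :: xs) := by
        rw [PySem.Set.mem_ofList]; simp
      have hym : y ∈ PySem.Set.ofList (x :: xs) := by
        rw [PySem.Set.mem_ofList]; simp [hy]
      have hlen : (PySem.Set.ofList (x :: xs)).length ≠ 1 := by
        intro h1
        obtain ⟨a, ha⟩ := List.length_eq_one_iff.mp h1
        rw [ha] at hxm hym
        simp only [List.mem_singleton] at hxm hym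
        exact hyx (hym.trans hxm.symm)
      have h2 : xs.all (· == x) = false := by
        exact List.all_eq_false.mpr ⟨y, hy, by simp [hyx]⟩
      rw [h2]
      simpa using hlen
  · have : (x == c) = false := by simp [hx]
    simp [this, List.all_cons]

-- the canonical result: column k ↦ g k
-- (everything below is parametrised by F : Int → Bool, the empty-column test, and the rate r)

def pvCnt (F : Int → Bool) (m : Nat) : Int := ((List.range m).countP (fun (k : Nat) => F ((k : Nat) : Int)) : Int)

def pvG (F : Int → Bool) (r : Int) (m : Nat) : Int := ((m : Int) + 1) + (r - 1) * pvCnt F (m + 1)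

def pvT (F : Int → Bool) (r : Int) (m : Nat) : List (Int × Int) :=
  (List.range m).map (fun (k : Nat) => ((k : Int), pvG F r k))

def pvD (F : Int → Bool) (r : Int) (m : Nat) : PySem.Dict Int Int := PySem.Dict.mk (pvT F r m)

lemma pvT_succ (F : Int → Bool) (r : Int) (m : Nat) :
    pvT F r (m + 1) = pvT F r m ++ [((m : Int), pvG F r m)] := by
  simp [pvT, List.range_succ]

lemma pvCnt_succ (F : Int → Bool) (m : Nat) :
    pvCnt F (m + 1) = pvCnt F m + (if F (m : Int) then 1 else 0) := by
  simp only [pvCnt, List.range_succ]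
  split_ifs with h <;> simp [h]

lemma pvD_keys (F : Int → Bool) (r : Int) (m : Nat) :
    (pvD F r m).keys = (List.range m).map (fun (k : Nat) => (k : Int)) := by
  simp [pvD, pvT, PySem.Dict.keys_mk, List.map_map, Function.comp]

lemma pvD_keys_nodup (F : Int → Bool) (r : Int) (m : Nat) : (pvD F r m).keys.Nodup := by
  rw [pvD_keys]
  exact (List.nodup_range).map (fun a b => by exact_mod_cast id)

lemma pvD_not_contains (F : Int → Bool) (r : Int) (m : Nat) :
    (pvD F r m).contains ((m : Int)) = false := by
  rw [PySem.Dict.contains_eq_decide_mem_keys, pvD_keys]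
  simp only [decide_eq_false_iff_not, List.mem_map, List.mem_range]
  rintro ⟨k, hk, hke⟩
  omega

lemma pvD_insert (F : Int → Bool) (r : Int) (m : Nat) :
    (pvD F r m).insert ((m : Int)) (pvG F r m) = pvD F r (m + 1) := by
  apply PySem.Dict.ext
  rw [PySem.Dict.items_insert_of_not_contains _ _ (pvD_not_contains F r m)]
  simp only [pvD, pvT_succ]

lemma pvD_getD_top (F : Int → Bool) (r : Int) (m : Nat) :
    (pvD F r (m + 1)).getD ((m : Int)) 0 = pvG F r m := by
  refine PySem.Dict.getD_of_mem_items _ ?_ (pvD_keys_nodup F r (m + 1)) 0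
  simp only [pvD, pvT]
  exact List.mem_map.mpr ⟨m, by simp, rfl⟩

-- the previous-column lookup result.get(col-1, 0) of A, characterised on the canonical dict
lemma pvD_getD_prev (F : Int → Bool) (r : Int) (m : Nat) :
    (pvD F r m).getD ((m : Int) - 1) 0 = pvG F r m - (if F (m : Int) then r else 1) := by
  have hval : pvG F r m - (if F (m : Int) then r else 1) =
      (m : Int) + (r - 1) * pvCnt F m := by
    rw [pvG, pvCnt_succ]
    split_ifs <;> ring
  cases m with
  | zero =>
    have : pvD F r 0 = PySem.Dict.empty := rfl
    rw [this, PySem.Dict.getD_empty, hval]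
    simp [pvCnt]
  | succ m' =>
    have h1 : ((m' + 1 : Nat) : Int) - 1 = (m' : Int) := by push_cast; ring
    rw [h1, pvD_getD_top, hval, pvG]
    push_cast
    ring

-- A's loop, with the empty-column test abstracted as F
lemma pvA_loop (F : Int → Bool) (r : Int) (m : Nat) :
    (PySem.List.pyRange 0 (m : Int)).foldl
      (fun (d : PySem.Dict Int Int) col =>
        if F col then d.insert col (d.getD (col - 1) 0 + r)
        else d.insert col (d.getD (col - 1) 0 + 1))
      PySem.Dict.empty = pvD F r m := by
  induction m with
  | zero => rw [Nat.cast_zero, PySem.List.pyRange_one_eq_nil le_rfl]; rfl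
  | succ m ih =>
    have hc : ((m + 1 : Nat) : Int) = (m : Int) + 1 := by push_cast; ring
    rw [hc, PySem.List.pyRange_one_succ_right (by positivity), List.foldl_append, ih]
    simp only [List.foldl_cons, List.foldl_nil]
    rw [← pvD_insert F r m]
    by_cases hF : F ((m : Int)) = true
    · rw [if_pos hF, pvD_getD_prev]
      rw [hF]; simp
    · rw [if_neg (by simpa using hF), pvD_getD_prev]
      rw [Bool.not_eq_true] at hF
      rw [hF]; simp

-- B's loop: inserting any per-column value function that agrees with pvG builds pvD
lemma pvB_loop (F : Int → Bool) (r : Int) (v : Int → Int) (m : Nat)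
    (hv : ∀ k : Nat, k < m → v ((k : Nat) : Int) = pvG F r k) :
    (PySem.List.pyRange 0 (m : Int)).foldl
      (fun (d : PySem.Dict Int Int) col => d.insert col (v col))
      PySem.Dict.empty = pvD F r m := by
  induction m with
  | zero => rw [Nat.cast_zero, PySem.List.pyRange_one_eq_nil le_rfl]; rfl
  | succ m ih =>
    have hc : ((m + 1 : Nat) : Int) = (m : Int) + 1 := by push_cast; ring
    rw [hc, PySem.List.pyRange_one_succ_right (by positivity),
      List.foldl_append, ih (fun k hk => hv k (by omega))]
    simp only [List.foldl_cons, List.foldl_nil]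
    rw [hv m (by omega), pvD_insert]

-- membership in the fold of intersections
lemma pv_mem_foldl_inter {α : Type} [BEq α] [LawfulBEq α] (g : String → PySem.Set α)
    (l : List String) (s : PySem.Set α) (y : α) :
    y ∈ l.foldl (fun s line => PySem.Set.inter s (g line)) s ↔
      y ∈ s ∧ ∀ line ∈ l, y ∈ g line := by
  induction l generalizing s with
  | nil => simp
  | cons a l ih =>
    simp only [List.foldl_cons, ih, PySem.Set.mem_inter, List.mem_cons]
    constructor
    · rintro ⟨⟨hs, ha⟩, hl⟩
      exact ⟨hs, fun line h => h.elim (fun h => h ▸ ha) (hl line)⟩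
    · rintro ⟨hs, hall⟩
      exact ⟨⟨hs, hall a (Or.inl rfl)⟩, fun line h => hall line (Or.inr h)⟩

-- membership in a line's dot-position set
lemma pv_mem_lineDots (line : String) (e : Int) :
    e ∈ pvLineDots line ↔
      ∃ k : Nat, ∃ h : k < line.toList.length, e = (k : Int) ∧ line.toList[k] = '.' := by
  simp only [pvLineDots, PySem.Set.mem_ofList, List.mem_map, List.mem_filter,
    PySem.List.mem_enumerate_iff]
  constructor
  · rintro ⟨p, ⟨⟨k, hk, rfl⟩, hdot⟩, rfl⟩
    exact ⟨k, hk, by simp, by simpa using hdot⟩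
  · rintro ⟨k, hk, rfl, hdot⟩
    exact ⟨((0 : Int) + (k : Int), line.toList[k]), ⟨⟨k, hk, rfl⟩, by simpa using hdot⟩, by simp⟩

lemma pv_nodup_foldl_inter {α : Type} [BEq α] [LawfulBEq α] (g : String → PySem.Set α)
    (l : List String) (s : PySem.Set α) (hs : s.Nodup) :
    (l.foldl (fun s line => PySem.Set.inter s (g line)) s).Nodup := by
  induction l generalizing s with
  | nil => exact hs
  | cons a l ih => exact ih _ (PySem.Set.nodup_inter _ _ hs)

-- counting the elements ≤ k of a nodup set of nonnegative ints = counting over range(k+1)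
lemma pv_count_range (s : List Int) (hnd : s.Nodup) (hpos : ∀ e ∈ s, 0 ≤ e) (k : Nat) :
    (s.filter (fun e => decide (e ≤ (k : Int)))).length
      = (List.range (k + 1)).countP (fun (j : Nat) => decide (((j : Nat) : Int) ∈ s)) := by
  rw [List.countP_eq_length_filter]
  have hperm : List.Perm (s.filter (fun e => decide (e ≤ (k : Int))))
      (((List.range (k + 1)).filter (fun (j : Nat) => decide (((j : Nat) : Int) ∈ s))).map
        (fun (j : Nat) => ((j : Nat) : Int))) := by
    rw [List.perm_ext_iff_of_nodup (hnd.filter _)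
      (((List.nodup_range).filter _).map (fun a b h => by exact_mod_cast h))]
    intro x
    simp only [List.mem_filter, List.mem_map, List.mem_range, decide_eq_true_eq]
    constructor
    · rintro ⟨hx, hle⟩
      have h0 : 0 ≤ x := hpos x hx
      exact ⟨x.toNat, ⟨by omega, by rwa [Int.toNat_of_nonneg h0]⟩,
        (Int.toNat_of_nonneg h0)⟩
    · rintro ⟨j, ⟨hj, hjs⟩, rfl⟩
      exact ⟨hjs, by exact_mod_cast Nat.lt_succ_iff.mp hj⟩
  rw [hperm.length_eq, List.length_map]

-- ===== VERDICT (by name: the statement is the Claim_ definition above) =====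
theorem effective_col_spec : Claim_equal_effective_col := by
  intro data expansion_rate _hdom hpre
  unfold Spec_effective_col
  obtain ⟨hne, hlines⟩ := hpre
  cases data with
  | nil => exact absurd rfl hne
  | cons first rest =>
    clear hne
    have hlines' : ∀ line ∈ first :: rest, first.toList.length ≤ line.toList.length := by
      intro line hl
      have := hlines line hl
      simp only [List.headD_cons, PySem.Str.len_eq] at this
      exact_mod_cast this
    rw [effective_col, effective_col_alt]
    set F : Int → Bool :=
      fun col => (first :: rest).all (fun line => (PySem.Str.pyGet? line col).getD ' ' == '.') with hF
    set w : Nat := first.toList.length with hw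
    have hlen : PySem.Str.len first = ((w : Nat) : Int) := by rw [PySem.Str.len_eq]
    set dots : PySem.Set Int :=
      rest.foldl (fun s line => PySem.Set.inter s (pvLineDots line)) (pvLineDots first) with hdots
    -- dots is the set of columns (of any index < len first) blank in every line
    have hmem_dots : ∀ e : Int, e ∈ dots ↔ ∀ line ∈ first :: rest,
        ∃ k : Nat, ∃ h : k < line.toList.length, e = (k : Int) ∧ line.toList[k] = '.' := by
      intro e
      rw [hdots, pv_mem_foldl_inter]
      simp only [List.mem_cons, ← pv_mem_lineDots]
      constructor
      · rintro ⟨h1, h2⟩ line (rfl | hl)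
        · exact h1
        · exact h2 line hl
      · intro h
        exact ⟨h first (Or.inl rfl), fun line hl => h line (Or.inr hl)⟩
    have hdots_pos : ∀ e ∈ dots, 0 ≤ e := by
      intro e he
      obtain ⟨k, _, rfl, -⟩ := (hmem_dots e).mp he first (by simp)
      positivity
    have hdots_nodup : dots.Nodup := by
      rw [hdots]
      have hbase : (pvLineDots first).Nodup := PySem.Set.nodup_ofList _
      clear hmem_dots hdots_pos hdots
      induction rest generalizing first with
      | nil => exact hbase
      | cons a l ih =>
        simp only [List.foldl_cons]
        -- restart the fold from the intersected base
        have : (PySem.Set.inter (pvLineDots first) (pvLineDots a)).Nodup :=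
          PySem.Set.nodup_inter _ _ hbase
        exact pv_nodup_foldl_inter pvLineDots l _ this
    -- A's empty-column test at column j < w  ⟺  (j : Int) ∈ dots
    have hFdots : ∀ j : Nat, j < w → (F ((j : Nat) : Int) = true ↔ ((j : Nat) : Int) ∈ dots) := by
      intro j hj
      rw [hmem_dots, hF]
      simp only [List.all_eq_true, beq_iff_eq]
      constructor
      · intro h line hl
        have hjl : j < line.toList.length := lt_of_lt_of_le hj (hlines' line hl)
        refine ⟨j, hjl, rfl, ?_⟩
        have := h line hl
        rwa [PySem.Str.pyGet?_natCast, List.getElem?_eq_getElem hjl, Option.getD_some] at this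
      · intro h line hl
        obtain ⟨k, hk, hke, hdot⟩ := h line hl
        have hkj : j = k := by exact_mod_cast hke
        subst hkj
        rw [PySem.Str.pyGet?_natCast, List.getElem?_eq_getElem hk, Option.getD_some, hdot]
    -- A's condition at any col equals F col
    have hcond : ∀ col : Int,
        ((((PySem.Set.ofList ((first :: rest).map (fun line => (PySem.Str.pyGet? line col).getD ' '))).length == 1))
          && (PySem.List.pyGetD ((first :: rest).map (fun line => (PySem.Str.pyGet? line col).getD ' ')) 0 ' ' == '.'))
        = F col := by
      intro col
      rw [List.map_cons, PySem.List.pyGetD_zero_cons, pv_cond_eq, hF]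
      simp [List.all_map, Function.comp_def]
    have hA : ∀ (d : PySem.Dict Int Int) (col : Int),
        (let transpose := (first :: rest).map (fun line => (PySem.Str.pyGet? line col).getD ' ')
         if ((PySem.Set.ofList transpose).length == 1) && (PySem.List.pyGetD transpose 0 ' ' == '.') then
           d.insert col (d.getD (col - 1) 0 + expansion_rate)
         else d.insert col (d.getD (col - 1) 0 + 1))
        = (if F col then d.insert col (d.getD (col - 1) 0 + expansion_rate)
           else d.insert col (d.getD (col - 1) 0 + 1)) := by
      intro d col
      simp only [hcond col]
    -- B's per-column value equals pvG for columns below w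
    have hv : ∀ k : Nat, k < w →
        ((k : Nat) : Int) + 1 + (expansion_rate - 1) *
          (((dots.filter (fun e => decide (e ≤ ((k : Nat) : Int)))).length : Int))
          = pvG F expansion_rate k := by
      intro k hk
      have hcnt : ((dots.filter (fun e => decide (e ≤ ((k : Nat) : Int)))).length : Int)
          = pvCnt F (k + 1) := by
        rw [pv_count_range dots hdots_nodup hdots_pos k, pvCnt]
        congr 1
        apply List.countP_congr
        intro j hj
        rw [List.mem_range] at hj
        have := hFdots j (by omega)
        simp only [decide_eq_true_eq]
        constructor
        · intro hmem; exact this.mpr (by simpa using hmem)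
        · intro hFj; simpa using this.mp hFj
      rw [hcnt, pvG]
    simp only [hlen]
    rw [PySem.List.foldl_congr_mem _ _ _ _ (fun d col _ => hA d col)]
    rw [pvA_loop F expansion_rate w]
    rw [pvB_loop F expansion_rate
      (fun col => col + 1 + (expansion_rate - 1) *
        (((dots.filter (fun e => decide (e ≤ col))).length : Int))) w hv]
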